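-- pv_equiv track=rewrite | github.com/Sagnify/ZENOLang | commands/misc/operators.py | is_pure_arithmetic
-- ===== SOURCE A (Python) =====
-- def is_pure_arithmetic(expression):
--     """Check if expression is pure arithmetic (no comparison operators)"""
--     arithmetic_ops = ['adds', 'plus', 'add', 'subtracts', 'minus', 'multiplies', 'times', 'multiply',
--                       'divides', 'divided_by', 'modulus', 'mod', 'power', 'to_the_power_of']
--     comparison_ops = ['is', 'isn\'t', 'equals', 'not_equals', 'less', 'less_than',
--                       'more', 'greater', 'greater_than', 'atleast', 'at_least',
--                       'atmost', 'at_most', 'contains', 'startswith', 'endswith']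
--
--     words = expression.lower().split()
--
--     # Check if we have arithmetic operators but NO comparison operators
--     has_arithmetic = any(op in words for op in arithmetic_ops)
--     has_comparison = any(op in words for op in comparison_ops)
--
--     return has_arithmetic and not has_comparison
-- ===== SOURCE B (Python) =====
-- def is_pure_arithmetic(expression):
--     """Check if expression is pure arithmetic (no comparison operators)"""
--     arithmetic_set = {'adds', 'plus', 'add', 'subtracts', 'minus', 'multiplies', 'times', 'multiply',
--                       'divides', 'divided_by', 'modulus', 'mod', 'power', 'to_the_power_of'}
--     comparison_set = {'is', "isn't", 'equals', 'not_equals', 'less', 'less_than',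
--                       'more', 'greater', 'greater_than', 'atleast', 'at_least',
--                       'atmost', 'at_most', 'contains', 'startswith', 'endswith'}
--     has_arithmetic = False
--     has_comparison = False
--     for word in expression.lower().split():
--         if word in arithmetic_set:
--             has_arithmetic = True
--         if word in comparison_set:
--             has_comparison = True
--         if has_arithmetic and has_comparison:
--             return False
--     return has_arithmetic and not has_comparison
-- ===== Notes on version B (the rewrite author's own statement) =====
-- stated objective: alternative
-- what changed: Inverts the iteration axis: instead of scanning the words list once for each of the 30 operators (any(op in words ...) twice), B makes a single pass over the words, testing each word's membership in two operator sets and exiting early once an arithmetic and a comparison operator have both been seen.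
import Mathlib
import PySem

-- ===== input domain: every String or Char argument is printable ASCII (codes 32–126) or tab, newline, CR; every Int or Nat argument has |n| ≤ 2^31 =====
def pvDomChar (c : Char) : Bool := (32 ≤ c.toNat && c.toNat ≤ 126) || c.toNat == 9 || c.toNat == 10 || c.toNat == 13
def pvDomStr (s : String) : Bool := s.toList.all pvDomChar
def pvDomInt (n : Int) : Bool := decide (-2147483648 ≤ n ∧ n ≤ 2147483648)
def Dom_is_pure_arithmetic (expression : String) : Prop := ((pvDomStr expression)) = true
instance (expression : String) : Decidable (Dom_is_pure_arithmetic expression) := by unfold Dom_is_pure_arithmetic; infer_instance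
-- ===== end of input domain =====

-- B makes ONE pass over the words, testing each word against two operator sets (early exit),
-- instead of A's scan of the words list once per operator; return values are identical (alternative decomposition).


-- ===== PORT A =====
def arithmetic_ops : List String :=
  ["adds", "plus", "add", "subtracts", "minus", "multiplies", "times", "multiply",
   "divides", "divided_by", "modulus", "mod", "power", "to_the_power_of"]

def comparison_ops : List String :=
  ["is", "isn't", "equals", "not_equals", "less", "less_than",
   "more", "greater", "greater_than", "atleast", "at_least",
   "atmost", "at_most", "contains", "startswith", "endswith"]

def is_pure_arithmetic (expression : String) : Bool :=
  let words := PySem.Str.split₀ (PySem.Str.lower expression)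
  let has_arithmetic := arithmetic_ops.any (fun op => words.contains op)
  let has_comparison := comparison_ops.any (fun op => words.contains op)
  has_arithmetic && !has_comparison

-- ===== PORT B =====
def arithmetic_set : PySem.Set String :=
  PySem.Set.ofList ["adds", "plus", "add", "subtracts", "minus", "multiplies", "times", "multiply",
                    "divides", "divided_by", "modulus", "mod", "power", "to_the_power_of"]

def comparison_set : PySem.Set String :=
  PySem.Set.ofList ["is", "isn't", "equals", "not_equals", "less", "less_than",
                    "more", "greater", "greater_than", "atleast", "at_least",
                    "atmost", "at_most", "contains", "startswith", "endswith"]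

-- the single pass over the words with the two flags and the early exit (B's for-loop)
def pvScanWords : List String → Bool → Bool → Bool
  | [], has_arithmetic, has_comparison => has_arithmetic && !has_comparison
  | word :: rest, has_arithmetic, has_comparison =>
    let has_arithmetic := has_arithmetic || PySem.Set.contains arithmetic_set word
    let has_comparison := has_comparison || PySem.Set.contains comparison_set word
    if has_arithmetic && has_comparison then false
    else pvScanWords rest has_arithmetic has_comparison

def is_pure_arithmetic_alt (expression : String) : Bool :=
  pvScanWords (PySem.Str.split₀ (PySem.Str.lower expression)) false false

-- ===== PRECONDITION & SPEC =====
def Spec_is_pure_arithmetic (expression : String) (out : Bool) : Prop := out = is_pure_arithmetic_alt expression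
instance (expression : String) (out : Bool) : Decidable (Spec_is_pure_arithmetic expression out) := by unfold Spec_is_pure_arithmetic; infer_instance

-- ===== CLAIM (what is proved, stated in full; the proofs are below) =====
def Claim_equal_is_pure_arithmetic : Prop := ∀ (expression : String), Dom_is_pure_arithmetic expression → Spec_is_pure_arithmetic expression (is_pure_arithmetic expression)

-- ===== LEMMAS AND PROOFS =====

-- B's loop computes "saw an arithmetic word AND no comparison word" over the whole list
theorem pvScanWords_eq (ws : List String) (ha hc : Bool) :
    pvScanWords ws ha hc =
      ((ha || ws.any (fun w => PySem.Set.contains arithmetic_set w)) &&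
       !(hc || ws.any (fun w => PySem.Set.contains comparison_set w))) := by
  induction ws generalizing ha hc with
  | nil => simp [pvScanWords]
  | cons w rest ih =>
    simp only [pvScanWords, List.any_cons]
    by_cases h : ((ha || PySem.Set.contains arithmetic_set w) &&
                  (hc || PySem.Set.contains comparison_set w)) = true
    · simp only [h, if_true]
      rcases Bool.and_eq_true .. |>.mp h with ⟨h1, h2⟩
      rw [← Bool.or_assoc, ← Bool.or_assoc, h1, h2]
      simp
    · simp only [h, if_false]
      rw [ih]
      simp [Bool.or_assoc]

-- set membership agrees with list membership on the original operator lists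
theorem arith_set_eq (w : String) :
    PySem.Set.contains arithmetic_set w = arithmetic_ops.contains w := by
  rw [Bool.eq_iff_iff]
  simp [arithmetic_set, arithmetic_ops, PySem.Set.mem_ofList]

theorem comp_set_eq (w : String) :
    PySem.Set.contains comparison_set w = comparison_ops.contains w := by
  rw [Bool.eq_iff_iff]
  simp [comparison_set, comparison_ops, PySem.Set.mem_ofList]

-- swapping the iteration axis: "some op occurs among the words" = "some word is an op"
theorem any_swap (l ws : List String) :
    l.any (fun o => ws.contains o) = ws.any (fun w => l.contains w) := by
  rw [Bool.eq_iff_iff]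
  simp only [List.any_eq_true, List.contains_iff_mem]
  exact ⟨fun ⟨o, ho, hw⟩ => ⟨o, hw, ho⟩, fun ⟨o, ho, hw⟩ => ⟨o, hw, ho⟩⟩

-- ===== VERDICT (by name: the statement is the Claim_ definition above) =====
theorem is_pure_arithmetic_spec : Claim_equal_is_pure_arithmetic := by
  intro expression _
  unfold Spec_is_pure_arithmetic is_pure_arithmetic is_pure_arithmetic_alt
  rw [pvScanWords_eq]
  simp only [Bool.false_or]
  rw [funext arith_set_eq, funext comp_set_eq, any_swap arithmetic_ops, any_swap comparison_ops]
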